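-- pv_equiv track=rewrite | github.com/gigi007-prog/DI-Bootcamp | week 1/day 4/dailychallenge4/dailychallenge4.py | solve_matrix
-- ===== SOURCE A (Python) =====
-- def solve_matrix(matrix):
--     rows = len(matrix)
--     cols = len(matrix[0])
--
--     decoded_message = ""
--
--     for column in range(cols):
--         temp = ""
--
--         for row in range(rows):
--             structure = matrix[row][column]
--
--             if structure.isalpha():
--                 temp += structure
--             elif temp:
--                 temp += " "
--
--         decoded_message += temp
--
--     return decoded_message
-- ===== SOURCE B (Python) =====
-- def _decode_column(col):
--     # drop leading non-letter cells, then letters stay, other cells become one space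
--     if not col:
--         return ""
--     if not col[0].isalpha():
--         return _decode_column(col[1:])
--     return "".join(s if s.isalpha() else " " for s in col)
--
--
-- def solve_matrix(matrix):
--     width = len(matrix[0])
--     columns = [[row[c] for row in matrix] for c in range(width)]
--     return "".join(_decode_column(col) for col in columns)
-- ===== Notes on version B (the rewrite author's own statement) =====
-- stated objective: alternative
-- what changed: A's interleaved double loop with a state-carrying temp accumulator is replaced by a materialise-then-transform decomposition: build each column as a list of cells, drop the leading non-letter cells by recursion, then map the remaining cells (letters kept, others become a space) and join.
import Mathlib
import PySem

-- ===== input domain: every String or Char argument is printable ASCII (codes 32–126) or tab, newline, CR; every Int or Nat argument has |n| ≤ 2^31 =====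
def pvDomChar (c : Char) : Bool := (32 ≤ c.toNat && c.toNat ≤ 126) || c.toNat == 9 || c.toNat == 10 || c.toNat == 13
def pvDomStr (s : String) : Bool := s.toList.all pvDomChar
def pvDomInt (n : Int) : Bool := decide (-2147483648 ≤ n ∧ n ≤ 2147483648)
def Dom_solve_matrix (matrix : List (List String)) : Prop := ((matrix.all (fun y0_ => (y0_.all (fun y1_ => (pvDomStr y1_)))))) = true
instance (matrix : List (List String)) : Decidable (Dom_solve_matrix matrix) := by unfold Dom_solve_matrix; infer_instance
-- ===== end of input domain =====

-- B replaces A's interleaved double loop with a state-carrying accumulator by a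
-- materialise-then-transform decomposition (build each column, drop its leading
-- non-letter cells, map the rest cell-wise); objective: alternative decomposition.

-- ===== PORT A =====
-- literal transliteration of A: outer fold over range(cols), inner fold over
-- range(rows) carrying 'temp'; indexing is in range under Pre_.
def solve_matrix (matrix : List (List String)) : String :=
  let rows : Int := matrix.length
  let cols : Int := (PySem.List.pyGetD matrix 0 []).length
  (PySem.List.pyRange 0 cols 1).foldl
    (fun decoded_message column =>
      decoded_message ++
        (PySem.List.pyRange 0 rows 1).foldl
          (fun temp row =>
            let structure_ := PySem.List.pyGetD (PySem.List.pyGetD matrix row []) column ""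
            if PySem.Str.strIsalpha structure_ then temp ++ structure_
            else if temp ≠ "" then temp ++ " "
            else temp)
          "")
    ""

-- ===== PORT B =====
-- B-side helper: drop leading non-letter cells, then map the remaining cells.
def decodeColumn : List String → String
  | [] => ""
  | s :: rest =>
    if PySem.Str.strIsalpha s = false then decodeColumn rest
    else PySem.Str.join "" ((s :: rest).map (fun t => if PySem.Str.strIsalpha t then t else " "))

def solve_matrix_alt (matrix : List (List String)) : String :=
  let width : Int := (PySem.List.pyGetD matrix 0 []).length
  let columns := (PySem.List.pyRange 0 width 1).map
    (fun c => matrix.map (fun row => PySem.List.pyGetD row c ""))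
  PySem.Str.join "" (columns.map decodeColumn)

-- ===== PRECONDITION & SPEC =====
-- Pre_ excludes exactly the inputs where Python A raises IndexError: the empty
-- matrix (len(matrix[0])) and rows shorter than the first row.
def Pre_solve_matrix (matrix : List (List String)) : Prop :=
  matrix ≠ [] ∧ ∀ row ∈ matrix, (matrix.headD []).length ≤ row.length
instance (matrix : List (List String)) : Decidable (Pre_solve_matrix matrix) := by
  unfold Pre_solve_matrix; infer_instance
def pvWitness_solve_matrix : List (List String) :=
  [["a", "1"], ["b", "c"]]

def Spec_solve_matrix (matrix : List (List String)) (out : String) : Prop := out = solve_matrix_alt matrix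
instance (matrix : List (List String)) (out : String) : Decidable (Spec_solve_matrix matrix out) := by unfold Spec_solve_matrix; infer_instance

-- ===== CLAIM (what is proved, stated in full; the proofs are below) =====
def Claim_equal_solve_matrix : Prop := ∀ (matrix : List (List String)), Dom_solve_matrix matrix → Pre_solve_matrix matrix → Spec_solve_matrix matrix (solve_matrix matrix)

-- ===== LEMMAS AND PROOFS =====

-- A's inner-loop step and B's cell transform
def stepA (temp s : String) : String :=
  if PySem.Str.strIsalpha s then temp ++ s
  else if temp ≠ "" then temp ++ " "
  else temp

def cellB (t : String) : String := if PySem.Str.strIsalpha t then t else " "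

theorem strIsalpha_ne_empty {s : String} (h : PySem.Str.strIsalpha s = true) : s ≠ "" := by
  intro hs; subst hs
  simp [PySem.Str.strIsalpha, PySem.Chars.strIsalpha] at h

theorem append_ne_empty {a b : String} (h : a ≠ "") : a ++ b ≠ "" := by
  intro he
  have := congrArg String.toList he
  simp at this
  exact h this.1

theorem join_empty_nil : PySem.Str.join "" ([] : List String) = "" := by
  apply String.toList_inj.mp
  simp [PySem.Str.toList_join, PySem.Chars.join_nil]

theorem join_empty_cons (x : String) (l : List String) :
    PySem.Str.join "" (x :: l) = x ++ PySem.Str.join "" l := by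
  apply String.toList_inj.mp
  cases l with
  | nil =>
    simp [PySem.Str.toList_join, PySem.Chars.join_singleton, PySem.Chars.join_nil,
      String.toList_append]
  | cons y ys =>
    simp [PySem.Str.toList_join, String.toList_append, PySem.Chars.join_cons_cons]

theorem foldl_stepA_of_ne (col : List String) (temp : String) (h : temp ≠ "") :
    col.foldl stepA temp = temp ++ PySem.Str.join "" (col.map cellB) := by
  induction col generalizing temp with
  | nil => simp [join_empty_nil]
  | cons t rest ih =>
    rw [List.map_cons, join_empty_cons, ← String.append_assoc]
    by_cases ha : PySem.Str.strIsalpha t = true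
    · rw [List.foldl_cons, show stepA temp t = temp ++ t from by unfold stepA; rw [if_pos ha],
        ih _ (append_ne_empty h), show cellB t = t from by unfold cellB; rw [if_pos ha]]
    · simp only [Bool.not_eq_true] at ha
      rw [List.foldl_cons,
        show stepA temp t = temp ++ " " from by unfold stepA; rw [if_neg (by rw [ha]; simp), if_pos h],
        ih _ (append_ne_empty h), show cellB t = " " from by unfold cellB; rw [if_neg (by rw [ha]; simp)]]

theorem foldl_stepA_eq_decodeColumn (col : List String) :
    col.foldl stepA "" = decodeColumn col := by
  induction col with
  | nil => rfl
  | cons s rest ih =>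
    by_cases ha : PySem.Str.strIsalpha s = true
    · rw [List.foldl_cons, show stepA "" s = s from by unfold stepA; rw [if_pos ha]; exact String.empty_append,
        foldl_stepA_of_ne _ _ (strIsalpha_ne_empty ha)]
      rw [show decodeColumn (s :: rest) = PySem.Str.join "" ((s :: rest).map (fun t => if PySem.Str.strIsalpha t then t else " ")) from by unfold decodeColumn; rw [if_neg (by rw [ha]; simp)]]
      rw [List.map_cons, join_empty_cons, show (if PySem.Str.strIsalpha s then s else " ") = s from by rw [if_pos ha]]
      congr 1
    · simp only [Bool.not_eq_true] at ha
      rw [List.foldl_cons, show stepA "" s = "" from by unfold stepA; rw [if_neg (by rw [ha]; simp), if_neg (by simp)], ih]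
      rw [show decodeColumn (s :: rest) = decodeColumn rest from by simp only [decodeColumn]; rw [if_pos ha]]


theorem foldl_append_join (l : List Int) (g : Int → String) (acc : String) :
    l.foldl (fun a c => a ++ g c) acc = acc ++ PySem.Str.join "" (l.map g) := by
  induction l generalizing acc with
  | nil => simp [join_empty_nil]
  | cons x xs ih => rw [List.foldl_cons, ih, List.map_cons, join_empty_cons, String.append_assoc]

theorem percol (matrix : List (List String)) (c : Int) :
    (PySem.List.pyRange 0 (matrix.length : Int) 1).foldl
      (fun temp row =>
        if PySem.Str.strIsalpha (PySem.List.pyGetD (PySem.List.pyGetD matrix row []) c "") then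
          temp ++ PySem.List.pyGetD (PySem.List.pyGetD matrix row []) c ""
        else if temp ≠ "" then temp ++ " "
        else temp) ""
    = decodeColumn (matrix.map (fun row => PySem.List.pyGetD row c "")) := by
  have h1 := PySem.List.foldl_pyRange_zero_pyGetD' matrix ([] : List String)
    (fun temp row => stepA temp (PySem.List.pyGetD row c "")) ""
  have h2 : (fun (temp : String) (row : Int) =>
        stepA temp (PySem.List.pyGetD (PySem.List.pyGetD matrix row []) c "")) =
      (fun temp row =>
        if PySem.Str.strIsalpha (PySem.List.pyGetD (PySem.List.pyGetD matrix row []) c "") then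
          temp ++ PySem.List.pyGetD (PySem.List.pyGetD matrix row []) c ""
        else if temp ≠ "" then temp ++ " "
        else temp) := by
    funext temp row; simp [stepA]
  rw [← h2, h1, ← List.foldl_map, foldl_stepA_eq_decodeColumn]

-- ===== VERDICT (by name: the statement is the Claim_ definition above) =====
theorem solve_matrix_spec : Claim_equal_solve_matrix := by
  intro matrix _ _
  unfold Spec_solve_matrix solve_matrix solve_matrix_alt
  simp only [List.map_map]
  rw [foldl_append_join]
  rw [String.empty_append]
  exact congrArg (PySem.Str.join "") (List.map_congr_left (fun c _ => percol matrix c))
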